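-- pv_equiv track=rewrite | github.com/lmilewicz/ev | bin/08_24/pymoo_test.py | blueprint_convert
-- ===== SOURCE A (Python) =====
-- def blueprint_convert(layers, x):
--     blueprint_graph = []
--     start = end = 0
--     for i in range(layers-1):
--         start = end
--         end = start+i+1
--         blueprint_graph.append(x[start:end])
--
--     return blueprint_graph
-- ===== SOURCE B (Python) =====
-- def blueprint_convert(layers, x):
--     out = []
--     rest = x
--     size = 1
--     remaining = max(layers - 1, 0)
--     while remaining:
--         out.append(rest[:size])
--         rest = rest[size:]
--         size += 1
--         remaining -= 1
--     return out
-- ===== Notes on version B (the rewrite author's own statement) =====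
-- stated objective: alternative
-- what changed: Instead of indexing the original list with running start/end offsets, B consumes the list itself: it repeatedly peels the next (growing) chunk off the front of the remainder, so no offsets into x exist at all.
import Mathlib
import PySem

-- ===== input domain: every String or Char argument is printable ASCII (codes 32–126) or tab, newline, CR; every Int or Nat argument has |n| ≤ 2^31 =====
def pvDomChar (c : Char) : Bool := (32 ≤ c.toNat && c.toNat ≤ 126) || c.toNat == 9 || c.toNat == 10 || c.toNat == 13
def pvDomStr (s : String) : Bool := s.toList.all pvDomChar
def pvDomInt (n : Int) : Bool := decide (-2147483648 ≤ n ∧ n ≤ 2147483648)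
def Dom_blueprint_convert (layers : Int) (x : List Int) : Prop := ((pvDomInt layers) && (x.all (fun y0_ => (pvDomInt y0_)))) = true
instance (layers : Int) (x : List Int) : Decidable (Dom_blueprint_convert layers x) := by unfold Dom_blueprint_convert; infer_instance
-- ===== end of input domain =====

-- B replaces A's indexed loop over the original list with a loop that consumes the
-- list itself, peeling each chunk off the front of the remainder (objective: alternative).

-- ===== PORT A =====
-- loop state: (start, end, blueprint_graph); one iteration of A's for-body
def bcStep (x : List Int) (s : Int × Int × List (List Int)) (i : Int) :
    Int × Int × List (List Int) :=
  let start := s.2.1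
  let e := start + i + 1
  (start, e, s.2.2 ++ [PySem.List.slice x (some start) (some e)])

def blueprint_convert (layers : Int) (x : List Int) : List (List Int) :=
  ((PySem.List.pyRange 0 (layers - 1) 1).foldl (bcStep x) (0, 0, [])).2.2

-- ===== PORT B =====
-- the while loop: peel the next chunk of length `size` off the front of `rest`
def bcGo : Nat → Int → List Int → List (List Int) → List (List Int)
  | 0, _, _, out => out
  | remaining + 1, size, rest, out =>
      bcGo remaining (size + 1) (PySem.List.slice rest (some size) none)
        (out ++ [PySem.List.slice rest none (some size)])

def blueprint_convert_alt (layers : Int) (x : List Int) : List (List Int) :=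
  bcGo (max (layers - 1) 0).toNat 1 x []

-- ===== PRECONDITION & SPEC =====
def Spec_blueprint_convert (layers : Int) (x : List Int) (out : List (List Int)) : Prop := out = blueprint_convert_alt layers x
instance (layers : Int) (x : List Int) (out : List (List Int)) : Decidable (Spec_blueprint_convert layers x out) := by unfold Spec_blueprint_convert; infer_instance

-- ===== CLAIM (what is proved, stated in full; the proofs are below) =====
def Claim_equal_blueprint_convert : Prop := ∀ (layers : Int) (x : List Int), Dom_blueprint_convert layers x → Spec_blueprint_convert layers x (blueprint_convert layers x)

-- ===== LEMMAS AND PROOFS =====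

-- A's loop, generalized: processing range(k, k+n) from state (a, b, acc) appends
-- exactly B's chunks of the remainder drop b x with sizes k+1, k+2, …
theorem blueprint_loop_eq_bcGo (x : List Int) (n : Nat) :
    ∀ (k b : Nat) (a : Int) (acc : List (List Int)),
      ((PySem.List.pyRange (k : Int) ((k : Int) + (n : Int)) 1).foldl (bcStep x)
        (a, (b : Int), acc)).2.2
      = bcGo n ((k : Int) + 1) (x.drop b) acc := by
  induction n with
  | zero =>
      intro k b a acc
      rw [PySem.List.pyRange_one_eq_nil (by simp)]
      simp [bcGo]
  | succ n ih =>
      intro k b a acc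
      have hcons : PySem.List.pyRange (k : Int) ((k : Int) + ((n + 1 : Nat) : Int)) 1
          = (k : Int) :: PySem.List.pyRange ((k : Int) + 1) ((k : Int) + ((n + 1 : Nat) : Int)) 1 := by
        exact PySem.List.pyRange_one_cons (by push_cast; omega)
      rw [hcons, List.foldl_cons]
      have h1 : ((k : Int) + 1) = (((k + 1 : Nat) : Int)) := by push_cast; ring
      have h2 : ((b : Int) + (k : Int) + 1) = (((b + k + 1 : Nat) : Int)) := by push_cast; ring
      have h3 : (k : Int) + ((n + 1 : Nat) : Int) = ((k + 1 : Nat) : Int) + ((n : Nat) : Int) := by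
        push_cast; ring
      rw [h3, h1]
      have hstep : bcStep x (a, (b : Int), acc) (k : Int)
          = ((b : Int), ((b + k + 1 : Nat) : Int),
              acc ++ [PySem.List.slice x (some (b : Int)) (some ((b + k + 1 : Nat) : Int))]) := by
        simp only [bcStep]; rw [h2]
      rw [hstep]
      have := ih (k + 1) (b + k + 1) (b : Int)
        (acc ++ [PySem.List.slice x (some ((b : Nat) : Int)) (some (((b + k + 1 : Nat)) : Int))])
      rw [this]
      -- identify A's chunk and B's chunk / remainder
      have hchunk : PySem.List.slice x (some (b : Int)) (some ((b + k + 1 : Nat) : Int))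
          = (x.drop b).take (k + 1) := by
        have := PySem.List.slice_natCast (xs := x) (a := b) (b := b + k + 1)
        rw [this]; congr 1; omega
      have hBchunk : PySem.List.slice (x.drop b) none (some ((k : Int) + 1))
          = (x.drop b).take (k + 1) := by
        rw [show (k : Int) + 1 = ((k + 1 : Nat) : Int) by push_cast; ring,
          PySem.List.slice_to_natCast]
      have hBrest : PySem.List.slice (x.drop b) (some ((k : Int) + 1)) none
          = x.drop (b + k + 1) := by
        rw [show (k : Int) + 1 = ((k + 1 : Nat) : Int) by push_cast; ring,
          PySem.List.slice_from_natCast, List.drop_drop]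
        congr 1
      rw [h1] at hBchunk hBrest
      rw [hchunk]
      simp only [bcGo, hBchunk, hBrest]

-- ===== VERDICT (by name: the statement is the Claim_ definition above) =====
theorem blueprint_convert_spec : Claim_equal_blueprint_convert := by
  intro layers x _
  unfold Spec_blueprint_convert blueprint_convert blueprint_convert_alt
  by_cases h : layers - 1 ≤ 0
  · rw [PySem.List.pyRange_one_eq_nil h, show (max (layers - 1) 0).toNat = 0 by omega]
    simp [bcGo]
  · have hm : (max (layers - 1) 0).toNat = (layers - 1).toNat := by omega
    rw [hm]
    have hmain := blueprint_loop_eq_bcGo x (layers - 1).toNat 0 0 0 []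
    have hb : ((0 : Nat) : Int) + (((layers - 1).toNat : Nat) : Int) = layers - 1 := by omega
    rw [hb] at hmain
    simpa using hmain
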